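-- pv_equiv track=rewrite | github.com/xuhb-bill/PyRedisAudit | core/parser.py | _has_unbalanced_quotes
-- ===== SOURCE A (Python) =====
-- def _has_unbalanced_quotes(line):
--     dq = 0
--     sq = 0
--     escaped = False
--     for ch in line:
--         if escaped:
--             escaped = False
--             continue
--         if ch == '\\':
--             escaped = True
--             continue
--         if ch == '"':
--             dq ^= 1
--             continue
--         if ch == "'":
--             sq ^= 1
--             continue
--     return dq == 1 or sq == 1
-- ===== SOURCE B (Python) =====
-- def _has_unbalanced_quotes(line):
--     # strip pass: drop each backslash together with the character it escapes,
--     # then judge balance by parity of the residual quote counts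
--     it = iter(line)
--     cleaned = []
--     for ch in it:
--         if ch == '\\':
--             next(it, None)
--         else:
--             cleaned.append(ch)
--     cleaned = ''.join(cleaned)
--     return cleaned.count('"') % 2 == 1 or cleaned.count("'") % 2 == 1
-- ===== Notes on version B (the rewrite author's own statement) =====
-- stated objective: alternative
-- what changed: Replaces the single stateful pass with XOR-toggled balance flags and an escape flag by a strip pass that deletes each backslash plus its escaped character, followed by two count passes whose parity decides balance.
import Mathlib
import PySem

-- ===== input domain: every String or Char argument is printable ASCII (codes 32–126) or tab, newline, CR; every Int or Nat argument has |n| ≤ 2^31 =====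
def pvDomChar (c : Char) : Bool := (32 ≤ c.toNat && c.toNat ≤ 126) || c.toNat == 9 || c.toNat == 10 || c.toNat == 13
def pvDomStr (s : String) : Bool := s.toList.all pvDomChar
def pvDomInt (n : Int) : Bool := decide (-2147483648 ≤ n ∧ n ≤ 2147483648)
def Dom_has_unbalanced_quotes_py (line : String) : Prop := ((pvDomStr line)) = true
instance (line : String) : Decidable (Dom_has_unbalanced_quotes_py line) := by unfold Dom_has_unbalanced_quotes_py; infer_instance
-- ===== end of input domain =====

-- B replaces A's single stateful XOR-flag pass by a strip-escapes pass followed by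
-- two quote-count parity checks (objective: alternative decomposition, same cost).

-- ===== PORT A =====
-- A's loop: state (dq, sq, escaped), one step per character, in A's branch order.
def pvLoopA : List Char → Nat → Nat → Bool → Bool
  | [], dq, sq, _ => decide (dq = 1) || decide (sq = 1)
  | _ :: t, dq, sq, true => pvLoopA t dq sq false
  | c :: t, dq, sq, false =>
    if c = '\\' then pvLoopA t dq sq true
    else if c = '"' then pvLoopA t (dq ^^^ 1) sq false
    else if c = '\'' then pvLoopA t dq (sq ^^^ 1) false
    else pvLoopA t dq sq false

def has_unbalanced_quotes_py (line : String) : Bool :=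
  pvLoopA line.toList 0 0 false

-- ===== PORT B =====
-- the strip pass of Source B: a backslash consumes the next character (if any)
def pvStripEsc : List Char → List Char
  | [] => []
  | '\\' :: [] => []
  | '\\' :: _ :: t => pvStripEsc t
  | c :: t => c :: pvStripEsc t

def has_unbalanced_quotes_py_alt (line : String) : Bool :=
  let cleaned := pvStripEsc line.toList
  decide (cleaned.count '"' % 2 = 1) || decide (cleaned.count '\'' % 2 = 1)

-- ===== PRECONDITION & SPEC =====
def Spec_has_unbalanced_quotes_py (line : String) (out : Bool) : Prop := out = has_unbalanced_quotes_py_alt line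
instance (line : String) (out : Bool) : Decidable (Spec_has_unbalanced_quotes_py line out) := by unfold Spec_has_unbalanced_quotes_py; infer_instance

-- ===== CLAIM (what is proved, stated in full; the proofs are below) =====
def Claim_equal_has_unbalanced_quotes_py : Prop := ∀ (line : String), Dom_has_unbalanced_quotes_py line → Spec_has_unbalanced_quotes_py line (has_unbalanced_quotes_py line)

-- ===== LEMMAS AND PROOFS =====

-- pvStripEsc on a non-backslash head just keeps it.
theorem pvStripEsc_cons_ne (c : Char) (t : List Char) (h : ¬ c = '\\') :
    pvStripEsc (c :: t) = c :: pvStripEsc t := by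
  rw [pvStripEsc]
  · exact fun h' _ => h h'
  · exact fun _ _ h' _ => h h'

-- A's loop from flags (dq, sq) computes exactly the parity of (flag + residual quote count).
theorem pvLoopA_eq_strip (l : List Char) :
    ∀ dq sq : Nat, dq ≤ 1 → sq ≤ 1 →
      pvLoopA l dq sq false
        = (decide ((dq + (pvStripEsc l).count '"') % 2 = 1)
            || decide ((sq + (pvStripEsc l).count '\'') % 2 = 1)) := by
  induction l using pvStripEsc.induct with
  | case1 =>
      intro dq sq hdq hsq
      simp [pvLoopA, pvStripEsc]
      interval_cases dq <;> interval_cases sq <;> decide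
  | case2 =>
      intro dq sq hdq hsq
      simp [pvLoopA, pvStripEsc]
      interval_cases dq <;> interval_cases sq <;> decide
  | case3 c t ih =>
      intro dq sq hdq hsq
      simpa [pvLoopA, pvStripEsc] using ih dq sq hdq hsq
  | case4 c t hne1 hne2 ih =>
      intro dq sq hdq hsq
      have hbs : ¬ c = '\\' := by
        intro h; subst h
        cases t with
        | nil => exact hne1 rfl rfl
        | cons a b => exact hne2 a b rfl rfl
      rw [pvStripEsc_cons_ne c t hbs]
      by_cases hdq2 : c = '"'
      · subst hdq2
        rw [show pvLoopA ('"' :: t) dq sq false = pvLoopA t (dq ^^^ 1) sq false from rfl,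
          ih (dq ^^^ 1) sq (by interval_cases dq <;> decide) hsq,
          show List.count '"' ('"' :: pvStripEsc t) = List.count '"' (pvStripEsc t) + 1 by simp,
          show List.count '\'' ('"' :: pvStripEsc t) = List.count '\'' (pvStripEsc t) by simp]
        congr 1
        rw [decide_eq_decide]
        interval_cases dq <;> simp only [Nat.zero_xor, Nat.xor_self] <;> omega
      · by_cases hsq2 : c = '\''
        · subst hsq2
          rw [show pvLoopA ('\'' :: t) dq sq false = pvLoopA t dq (sq ^^^ 1) false from rfl,
            ih dq (sq ^^^ 1) hdq (by interval_cases sq <;> decide),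
            show List.count '\'' ('\'' :: pvStripEsc t) = List.count '\'' (pvStripEsc t) + 1 by simp,
            show List.count '"' ('\'' :: pvStripEsc t) = List.count '"' (pvStripEsc t) by simp]
          congr 1
          rw [decide_eq_decide]
          interval_cases sq <;> simp only [Nat.zero_xor, Nat.xor_self] <;> omega
        · have step : pvLoopA (c :: t) dq sq false = pvLoopA t dq sq false := by
            simp [pvLoopA, hbs, hdq2, hsq2]
          rw [step, ih dq sq hdq hsq,
            show List.count '"' (c :: pvStripEsc t) = List.count '"' (pvStripEsc t) by simp [hdq2],
            show List.count '\'' (c :: pvStripEsc t) = List.count '\'' (pvStripEsc t) by simp [hsq2]]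

-- ===== VERDICT (by name: the statement is the Claim_ definition above) =====
theorem has_unbalanced_quotes_py_spec : Claim_equal_has_unbalanced_quotes_py := by
  intro line _
  unfold Spec_has_unbalanced_quotes_py has_unbalanced_quotes_py has_unbalanced_quotes_py_alt
  simpa using pvLoopA_eq_strip line.toList 0 0 (by simp) (by simp)
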